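-- pv_equiv track=rewrite | github.com/DeeAmps/marvel-cartographer | data/import/import_phase1_parse.py | filter_non_marvel
-- ===== SOURCE A (Python) =====
-- def filter_non_marvel(entries: list[dict]) -> tuple[list[dict], list[dict], list[dict]]:
--     """Separate Star Wars, Conan, and Marvel entries."""
--     marvel = []
--     star_wars = []
--     conan = []
--
--     for entry in entries:
--         title_lower = entry["Title"].lower()
--         if "star wars" in title_lower:
--             star_wars.append(entry)
--         elif "conan" in title_lower:
--             conan.append(entry)
--         else:
--             marvel.append(entry)
--
--     return marvel, star_wars, conan
-- ===== SOURCE B (Python) =====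
-- def filter_non_marvel(entries: list[dict]) -> tuple[list[dict], list[dict], list[dict]]:
--     """Separate Star Wars, Conan, and Marvel entries (three filtered scans)."""
--     star_wars = [e for e in entries if "star wars" in e["Title"].lower()]
--     conan = [e for e in entries
--              if "star wars" not in e["Title"].lower() and "conan" in e["Title"].lower()]
--     marvel = [e for e in entries
--               if "star wars" not in e["Title"].lower() and "conan" not in e["Title"].lower()]
--     return marvel, star_wars, conan
-- ===== Notes on version B (the rewrite author's own statement) =====
-- stated objective: alternative
-- what changed: Replaces the single accumulating partition loop (append to one of three lists per element) with three independent filtered scans of the input, one predicate per output list, with the elif precedence expressed as explicit negations.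
import Mathlib
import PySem

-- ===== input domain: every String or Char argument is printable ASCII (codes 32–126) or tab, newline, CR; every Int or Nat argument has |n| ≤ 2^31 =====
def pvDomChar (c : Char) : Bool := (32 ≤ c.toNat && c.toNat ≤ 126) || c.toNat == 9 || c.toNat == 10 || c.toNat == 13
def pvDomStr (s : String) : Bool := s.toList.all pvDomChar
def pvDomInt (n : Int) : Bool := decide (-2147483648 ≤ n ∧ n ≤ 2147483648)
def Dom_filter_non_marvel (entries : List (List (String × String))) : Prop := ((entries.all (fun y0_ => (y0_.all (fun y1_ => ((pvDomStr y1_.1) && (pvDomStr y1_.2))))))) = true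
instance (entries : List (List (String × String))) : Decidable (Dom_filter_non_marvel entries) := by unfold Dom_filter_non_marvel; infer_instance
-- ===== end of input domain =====

-- B replaces A's single three-way partition loop by three independent filtered scans
-- (one predicate per output list); equivalence proved on entries that all carry a "Title" key.


-- ===== PORT A =====
-- shared title helper: entry["Title"].lower(); Pre_ guarantees the key is present
-- (Python raises KeyError exactly where it is absent, which Pre_ excludes).
def pvTitleLower (entry : List (String × String)) : String :=
  PySem.Str.lower (PySem.Dict.getD (PySem.Dict.mk entry) "Title" "")

def filter_non_marvel (entries : List (List (String × String))) : (List (List (String × String))) × (List (List (String × String))) × (List (List (String × String))) :=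
  entries.foldl
    (fun st entry =>
      let title_lower := pvTitleLower entry
      if PySem.Str.isIn "star wars" title_lower then (st.1, st.2.1 ++ [entry], st.2.2)
      else if PySem.Str.isIn "conan" title_lower then (st.1, st.2.1, st.2.2 ++ [entry])
      else (st.1 ++ [entry], st.2.1, st.2.2))
    ([], [], [])

-- ===== PORT B =====
def filter_non_marvel_alt (entries : List (List (String × String))) : (List (List (String × String))) × (List (List (String × String))) × (List (List (String × String))) :=
  let star_wars := entries.filter (fun e => PySem.Str.isIn "star wars" (pvTitleLower e))
  let conan := entries.filter (fun e =>
    !PySem.Str.isIn "star wars" (pvTitleLower e) && PySem.Str.isIn "conan" (pvTitleLower e))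
  let marvel := entries.filter (fun e =>
    !PySem.Str.isIn "star wars" (pvTitleLower e) && !PySem.Str.isIn "conan" (pvTitleLower e))
  (marvel, star_wars, conan)

-- ===== PRECONDITION & SPEC =====
-- Pre_ excludes exactly the entries lacking a "Title" key, on which Python A raises KeyError.
def Pre_filter_non_marvel (entries : List (List (String × String))) : Prop :=
  entries.all (fun e => e.any (fun p => p.1 == "Title")) = true
instance (entries : List (List (String × String))) : Decidable (Pre_filter_non_marvel entries) := by unfold Pre_filter_non_marvel; infer_instance
def pvWitness_filter_non_marvel : (List (List (String × String))) := [[("Title", "Star Wars #1")], [("Title", "Conan")], [("Title", "X-Men")]]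
def Spec_filter_non_marvel (entries : List (List (String × String))) (out : (List (List (String × String))) × (List (List (String × String))) × (List (List (String × String)))) : Prop := out = filter_non_marvel_alt entries
instance (entries : List (List (String × String))) (out : (List (List (String × String))) × (List (List (String × String))) × (List (List (String × String)))) : Decidable (Spec_filter_non_marvel entries out) := by unfold Spec_filter_non_marvel; infer_instance

-- ===== CLAIM (what is proved, stated in full; the proofs are below) =====
def Claim_equal_filter_non_marvel : Prop := ∀ (entries : List (List (String × String))), Dom_filter_non_marvel entries → Pre_filter_non_marvel entries → Spec_filter_non_marvel entries (filter_non_marvel entries)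

-- ===== LEMMAS AND PROOFS =====

-- A's loop, run from an arbitrary accumulator, appends exactly the three filters.
theorem filter_non_marvel_foldl (entries : List (List (String × String)))
    (m s c : List (List (String × String))) :
    entries.foldl
      (fun st entry =>
        let title_lower := pvTitleLower entry
        if PySem.Str.isIn "star wars" title_lower then (st.1, st.2.1 ++ [entry], st.2.2)
        else if PySem.Str.isIn "conan" title_lower then (st.1, st.2.1, st.2.2 ++ [entry])
        else (st.1 ++ [entry], st.2.1, st.2.2))
      (m, s, c)
    = (m ++ entries.filter (fun e =>
          !PySem.Str.isIn "star wars" (pvTitleLower e) && !PySem.Str.isIn "conan" (pvTitleLower e)),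
       s ++ entries.filter (fun e => PySem.Str.isIn "star wars" (pvTitleLower e)),
       c ++ entries.filter (fun e =>
          !PySem.Str.isIn "star wars" (pvTitleLower e) && PySem.Str.isIn "conan" (pvTitleLower e))) := by
  induction entries generalizing m s c with
  | nil => simp
  | cons e t ih =>
    simp only [List.foldl_cons, List.filter_cons]
    by_cases hs : PySem.Str.isIn "star wars" (pvTitleLower e) = true
    · simp only [hs, Bool.not_true, Bool.false_and, Bool.false_eq_true, ite_true,
        ite_false, ih, List.append_assoc, List.singleton_append]
    · by_cases hc : PySem.Str.isIn "conan" (pvTitleLower e) = true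
      · simp only [hs, hc, Bool.not_false, Bool.not_true, Bool.true_and,
          Bool.false_eq_true, ite_true, ite_false, ih, List.append_assoc,
          List.singleton_append, Bool.not_eq_true] at *
      · simp only [Bool.not_eq_true] at hs hc
        simp only [hs, hc, Bool.not_false, Bool.true_and, Bool.and_self, Bool.false_eq_true,
          reduceIte, ite_true, ite_false, ih, List.append_assoc, List.singleton_append]

-- ===== VERDICT (by name: the statement is the Claim_ definition above) =====
theorem filter_non_marvel_spec : Claim_equal_filter_non_marvel := by
  intro entries _ _
  unfold Spec_filter_non_marvel filter_non_marvel filter_non_marvel_alt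
  simpa using filter_non_marvel_foldl entries [] [] []
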